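-- pv_equiv track=rewrite | github.com/tmenguy/quiet-solar | scripts/qs/utils.py | detect_risk_level
-- ===== SOURCE A (Python) =====
-- def detect_risk_level(changed_files: list[str]) -> list[str]:
--     """Determine risk levels from changed file paths."""
--     risk_map = {
--         "CRITICAL": ["solver.py", "constraints.py", "charger.py", "dynamic_group.py"],
--         "HIGH": ["load.py", "const.py", "ha_model/home.py", "ha_model/device.py"],
--         "MEDIUM": ["ha_model/person.py", "ha_model/car.py", "ha_model/battery.py", "ha_model/solar.py", "config_flow.py"],
--         "LOW": ["sensor.py", "switch.py", "number.py", "select.py", "button.py", "ui/"],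
--     }
--     levels = set()
--     for f in changed_files:
--         for level, patterns in risk_map.items():
--             if any(p in f for p in patterns):
--                 levels.add(level)
--     return sorted(levels, key=["CRITICAL", "HIGH", "MEDIUM", "LOW"].index) if levels else ["LOW"]
-- ===== SOURCE B (Python) =====
-- def detect_risk_level(changed_files: list[str]) -> list[str]:
--     """Determine risk levels from changed file paths."""
--     risk_map = {
--         "CRITICAL": ["solver.py", "constraints.py", "charger.py", "dynamic_group.py"],
--         "HIGH": ["load.py", "const.py", "ha_model/home.py", "ha_model/device.py"],
--         "MEDIUM": ["ha_model/person.py", "ha_model/car.py", "ha_model/battery.py", "ha_model/solar.py", "config_flow.py"],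
--         "LOW": ["sensor.py", "switch.py", "number.py", "select.py", "button.py", "ui/"],
--     }
--     result = [level for level, patterns in risk_map.items()
--               if any(p in f for f in changed_files for p in patterns)]
--     return result or ["LOW"]
-- ===== Notes on version B (the rewrite author's own statement) =====
-- stated objective: simpler
-- what changed: Iterates the priority levels as the outer pass and collects matching levels directly in priority order, dropping A's per-file set accumulator and the sorted(..., key=list.index) step; the generator short-circuits per level, so per-file set operations disappear.
import Mathlib
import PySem

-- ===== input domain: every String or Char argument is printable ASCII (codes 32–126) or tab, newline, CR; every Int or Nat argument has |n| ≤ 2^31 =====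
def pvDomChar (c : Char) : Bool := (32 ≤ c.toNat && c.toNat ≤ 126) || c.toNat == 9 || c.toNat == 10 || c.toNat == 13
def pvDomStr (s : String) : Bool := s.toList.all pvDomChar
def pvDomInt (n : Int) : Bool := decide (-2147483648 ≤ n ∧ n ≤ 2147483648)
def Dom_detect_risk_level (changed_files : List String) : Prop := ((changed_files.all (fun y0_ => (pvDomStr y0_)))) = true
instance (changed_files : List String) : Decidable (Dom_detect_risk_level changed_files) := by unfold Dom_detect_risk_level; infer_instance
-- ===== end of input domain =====

-- B replaces A's per-file set accumulator plus sorted(..., key=list.index) by one outer pass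
-- over the priority levels, collecting matching levels directly in priority order (objective: simpler).

-- The risk_map dict literal, module data iterated in insertion order by both versions.
def riskMap : List (String × List String) :=
  [("CRITICAL", ["solver.py", "constraints.py", "charger.py", "dynamic_group.py"]),
   ("HIGH", ["load.py", "const.py", "ha_model/home.py", "ha_model/device.py"]),
   ("MEDIUM", ["ha_model/person.py", "ha_model/car.py", "ha_model/battery.py", "ha_model/solar.py", "config_flow.py"]),
   ("LOW", ["sensor.py", "switch.py", "number.py", "select.py", "button.py", "ui/"])]

def canonLevels : List String := ["CRITICAL", "HIGH", "MEDIUM", "LOW"]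

-- ===== PORT A =====
-- key=["CRITICAL","HIGH","MEDIUM","LOW"].index : exact here since every element of the set is
-- one of those four strings, so .index never raises; the getD 0 default branch is unreachable.
def detect_risk_level (changed_files : List String) : List String :=
  let levels : PySem.Set String :=
    changed_files.foldl (fun s f =>
      riskMap.foldl (fun s lp =>
        if lp.2.any (fun p => PySem.Str.isIn p f) then PySem.Set.add s lp.1 else s) s)
      PySem.Set.empty
  if levels = [] then ["LOW"]
  else PySem.List.sorted levels (fun lvl => (PySem.List.index? canonLevels lvl).getD 0) false

-- ===== PORT B =====
def detect_risk_level_alt (changed_files : List String) : List String :=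
  let result : List String :=
    riskMap.foldl (fun acc lp =>
      if changed_files.any (fun f => lp.2.any (fun p => PySem.Str.isIn p f)) then acc ++ [lp.1]
      else acc) []
  if result = [] then ["LOW"] else result

-- ===== PRECONDITION & SPEC =====
def Spec_detect_risk_level (changed_files : List String) (out : List String) : Prop := out = detect_risk_level_alt changed_files
instance (changed_files : List String) (out : List String) : Decidable (Spec_detect_risk_level changed_files out) := by unfold Spec_detect_risk_level; infer_instance

-- ===== CLAIM (what is proved, stated in full; the proofs are below) =====
def Claim_equal_detect_risk_level : Prop := ∀ (changed_files : List String), Dom_detect_risk_level changed_files → Spec_detect_risk_level changed_files (detect_risk_level changed_files)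

-- ===== LEMMAS AND PROOFS =====

def pats1 : List String := ["solver.py", "constraints.py", "charger.py", "dynamic_group.py"]
def pats2 : List String := ["load.py", "const.py", "ha_model/home.py", "ha_model/device.py"]
def pats3 : List String := ["ha_model/person.py", "ha_model/car.py", "ha_model/battery.py", "ha_model/solar.py", "config_flow.py"]
def pats4 : List String := ["sensor.py", "switch.py", "number.py", "select.py", "button.py", "ui/"]

theorem riskMap_lit : riskMap = [("CRITICAL", pats1), ("HIGH", pats2), ("MEDIUM", pats3), ("LOW", pats4)] := rfl

-- the per-level match predicate ("some changed file contains some pattern")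
def hitP (changed_files : List String) (pats : List String) : Bool :=
  changed_files.any (fun f => pats.any (fun p => PySem.Str.isIn p f))

-- per-pair condition of A's inner loop for a fixed file f
def condF (f : String) (lp : String × List String) : Bool :=
  lp.2.any (fun p => PySem.Str.isIn p f)

-- A's inner per-file step over the risk map
def stepA (s : PySem.Set String) (f : String) : PySem.Set String :=
  riskMap.foldl (fun s lp =>
    if lp.2.any (fun p => PySem.Str.isIn p f) then PySem.Set.add s lp.1 else s) s

theorem mem_foldl_rm (f : String) (rm : List (String × List String)) (s : PySem.Set String)
    (x : String) :
    x ∈ rm.foldl (fun s lp => if condF f lp then PySem.Set.add s lp.1 else s) s ↔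
      x ∈ s ∨ ∃ lp ∈ rm, lp.1 = x ∧ condF f lp = true := by
  induction rm generalizing s with
  | nil => simp
  | cons a t ih =>
    rw [List.foldl_cons]
    by_cases h : condF f a = true
    · rw [if_pos h, ih]
      simp only [PySem.Set.mem_add, List.mem_cons]
      constructor
      · rintro ((hs | he) | ⟨lp, hm, he, hc⟩)
        · exact .inl hs
        · exact .inr ⟨a, .inl rfl, he.symm, h⟩
        · exact .inr ⟨lp, .inr hm, he, hc⟩
      · rintro (hs | ⟨lp, (rfl | hm), he, hc⟩)
        · exact .inl (.inl hs)
        · exact .inl (.inr he.symm)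
        · exact .inr ⟨lp, hm, he, hc⟩
    · rw [if_neg h, ih]
      simp only [List.mem_cons]
      constructor
      · rintro (hs | ⟨lp, hm, he, hc⟩)
        · exact .inl hs
        · exact .inr ⟨lp, .inr hm, he, hc⟩
      · rintro (hs | ⟨lp, (rfl | hm), he, hc⟩)
        · exact .inl hs
        · exact absurd hc h
        · exact .inr ⟨lp, hm, he, hc⟩

theorem stepA_eq (s : PySem.Set String) (f : String) :
    stepA s f = riskMap.foldl (fun s lp => if condF f lp then PySem.Set.add s lp.1 else s) s := rfl

theorem nodup_stepA (s : PySem.Set String) (f : String) (h : s.Nodup) : (stepA s f).Nodup := by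
  rw [stepA_eq]
  induction riskMap generalizing s with
  | nil => exact h
  | cons a t ih =>
    rw [List.foldl_cons]
    by_cases hc : condF f a = true
    · rw [if_pos hc]; exact ih _ (PySem.Set.nodup_add _ _ h)
    · rw [if_neg hc]; exact ih _ h

theorem mem_levels (cf : List String) (s : PySem.Set String) (x : String) :
    x ∈ cf.foldl stepA s ↔ x ∈ s ∨ ∃ lp ∈ riskMap, lp.1 = x ∧ hitP cf lp.2 = true := by
  induction cf generalizing s with
  | nil => simp [hitP]
  | cons f t ih =>
    rw [List.foldl_cons, ih, stepA_eq, mem_foldl_rm]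
    constructor
    · rintro ((h | ⟨lp, hm, he, hp⟩) | ⟨lp, hm, he, hp⟩)
      · exact .inl h
      · exact .inr ⟨lp, hm, he, by
          simp only [hitP, List.any_cons, Bool.or_eq_true]; exact .inl hp⟩
      · exact .inr ⟨lp, hm, he, by
          simp only [hitP, List.any_cons, Bool.or_eq_true]; exact .inr hp⟩
    · rintro (h | ⟨lp, hm, he, hp⟩)
      · exact .inl (.inl h)
      · have hp' : (lp.2.any fun p => PySem.Str.isIn p f) = true ∨
            (t.any fun g => lp.2.any fun p => PySem.Str.isIn p g) = true := by
          simpa only [hitP, List.any_cons, Bool.or_eq_true] using hp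
        rcases hp' with h' | h'
        · exact .inl (.inr ⟨lp, hm, he, h'⟩)
        · exact .inr ⟨lp, hm, he, h'⟩

theorem nodup_levels (cf : List String) (s : PySem.Set String) (h : s.Nodup) :
    (cf.foldl stepA s).Nodup := by
  induction cf generalizing s with
  | nil => exact h
  | cons f t ih => exact ih _ (nodup_stepA _ _ h)

-- sorting any nodup list of members of canonLevels by index = filtering canonLevels
theorem sorted_eq_filter (s : List String) (hnd : s.Nodup) (hsub : ∀ x ∈ s, x ∈ canonLevels) :
    PySem.List.sorted s (fun lvl => (PySem.List.index? canonLevels lvl).getD 0) false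
      = canonLevels.filter (fun x => decide (x ∈ s)) := by
  apply PySem.List.sorted_eq_of_perm_of_pairwise_lt
  · apply (List.perm_ext_iff_of_nodup (List.Nodup.filter _ (by decide)) hnd).mpr
    intro a
    simp only [List.mem_filter, decide_eq_true_eq]
    exact ⟨fun h => h.2, fun h => ⟨hsub a h, h⟩⟩
  · exact List.Pairwise.filter _ (by decide)

-- B's result, characterized through hitP
theorem B_eq (cf : List String) : detect_risk_level_alt cf =
    (let r := (if hitP cf pats1 then ["CRITICAL"] else ([] : List String)) ++
              (if hitP cf pats2 then ["HIGH"] else []) ++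
              (if hitP cf pats3 then ["MEDIUM"] else []) ++
              (if hitP cf pats4 then ["LOW"] else []);
     if r = [] then ["LOW"] else r) := by
  simp only [detect_risk_level_alt, riskMap, List.foldl]
  rcases Bool.eq_false_or_eq_true (hitP cf pats1) with hb1 | hb1 <;>
  rcases Bool.eq_false_or_eq_true (hitP cf pats2) with hb2 | hb2 <;>
  rcases Bool.eq_false_or_eq_true (hitP cf pats3) with hb3 | hb3 <;>
  rcases Bool.eq_false_or_eq_true (hitP cf pats4) with hb4 | hb4 <;>
  · simp only [hb1, hb2, hb3, hb4]
    simp only [hitP, pats1, pats2, pats3, pats4] at hb1 hb2 hb3 hb4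
    simp only [hb1, hb2, hb3, hb4]
    simp

theorem main_eq (cf : List String) : detect_risk_level cf = detect_risk_level_alt cf := by
  show (if cf.foldl stepA PySem.Set.empty = [] then ["LOW"]
        else PySem.List.sorted (cf.foldl stepA PySem.Set.empty)
          (fun lvl => (PySem.List.index? canonLevels lvl).getD 0) false) = _
  set s := cf.foldl stepA PySem.Set.empty with hs
  have hmem := mem_levels cf PySem.Set.empty
  have hnd : s.Nodup := nodup_levels cf PySem.Set.empty (by simp [PySem.Set.empty])
  have m1 : ("CRITICAL" ∈ s) ↔ hitP cf pats1 = true := by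
    rw [hs, hmem]; simp [riskMap_lit, PySem.Set.empty]
  have m2 : ("HIGH" ∈ s) ↔ hitP cf pats2 = true := by
    rw [hs, hmem]; simp [riskMap_lit, PySem.Set.empty]
  have m3 : ("MEDIUM" ∈ s) ↔ hitP cf pats3 = true := by
    rw [hs, hmem]; simp [riskMap_lit, PySem.Set.empty]
  have m4 : ("LOW" ∈ s) ↔ hitP cf pats4 = true := by
    rw [hs, hmem]; simp [riskMap_lit, PySem.Set.empty]
  have hsub : ∀ x ∈ s, x ∈ canonLevels := by
    intro x hx
    rcases (hmem x).mp (hs ▸ hx) with h | ⟨lp, hm, he, _⟩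
    · simp [PySem.Set.empty] at h
    · subst he
      rw [riskMap_lit] at hm
      simp only [List.mem_cons, List.not_mem_nil, or_false] at hm
      rcases hm with h | h | h | h <;> subst h <;> simp [canonLevels]
  have hsnil : s = [] ↔
      hitP cf pats1 = false ∧ hitP cf pats2 = false ∧ hitP cf pats3 = false ∧ hitP cf pats4 = false := by
    constructor
    · intro h
      rw [h] at m1 m2 m3 m4
      simp only [List.not_mem_nil, false_iff, Bool.not_eq_true] at m1 m2 m3 m4
      exact ⟨m1, m2, m3, m4⟩
    · rintro ⟨f1, f2, f3, f4⟩
      rw [hs, List.eq_nil_iff_forall_not_mem]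
      intro x hx
      rcases (hmem x).mp hx with h | ⟨lp, hm, he, hp⟩
      · simp [PySem.Set.empty] at h
      · rw [riskMap_lit] at hm
        simp only [List.mem_cons, List.not_mem_nil, or_false] at hm
        rcases hm with h | h | h | h <;> subst h <;> simp_all
  rw [B_eq]
  rcases Bool.eq_false_or_eq_true (hitP cf pats1) with hb1 | hb1 <;>
  rcases Bool.eq_false_or_eq_true (hitP cf pats2) with hb2 | hb2 <;>
  rcases Bool.eq_false_or_eq_true (hitP cf pats3) with hb3 | hb3 <;>
  rcases Bool.eq_false_or_eq_true (hitP cf pats4) with hb4 | hb4 <;>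
  · by_cases hse : s = []
    · rw [if_pos hse]
      obtain ⟨f1, f2, f3, f4⟩ := hsnil.mp hse
      simp [f1, f2, f3, f4]
    · rw [if_neg hse, sorted_eq_filter s hnd hsub]
      first
      | exact absurd (hsnil.mpr ⟨hb1, hb2, hb3, hb4⟩) hse
      | simp [canonLevels, List.filter, m1, m2, m3, m4, hb1, hb2, hb3, hb4]

-- ===== VERDICT (by name: the statement is the Claim_ definition above) =====
theorem detect_risk_level_spec : Claim_equal_detect_risk_level := by
  intro cf _
  unfold Spec_detect_risk_level
  exact main_eq cf
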